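-- pv_equiv track=rewrite | github.com/SunshineHai/data_structure | 1.数组/189. 轮转数组.py | rotate4
-- ===== SOURCE A (Python) =====
-- def rotate4(nums, k):
--     """环形替换：循环次数使用 cnt 记录 元素个数，cnt == n 时结束循环"""
--     n = len(nums)
--     current = start = 0
--     cnt = 0                 # 记录交换的元素总个数
--     while cnt < n:          # 使用 cnt 判断 元素是否交换完
--         temp = nums[current]
--         while True:
--             new_index = (current + k) % n
--             temp, nums[new_index] = nums[new_index], temp
--             current = new_index
--             cnt += 1
--             if current == start:
--                 current += 1
--                 start += 1
--                 break
--     return nums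
-- ===== SOURCE B (Python) =====
-- def rotate4(nums, k):
--     """Rotate right by k using slicing (in-place via nums[:] =)."""
--     n = len(nums)
--     if n == 0:
--         return nums
--     k %= n
--     nums[:] = nums[n - k:] + nums[:n - k]
--     return nums
-- ===== Notes on version B (the rewrite author's own statement) =====
-- stated objective: simpler
-- what changed: Replaced the gcd-cycle in-place cyclic-replacement (nested while loops with temp/current/start/cnt bookkeeping) by a two-slice rotation: reduce k mod n and assign nums[:] = nums[n-k:] + nums[:n-k].
import Mathlib
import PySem

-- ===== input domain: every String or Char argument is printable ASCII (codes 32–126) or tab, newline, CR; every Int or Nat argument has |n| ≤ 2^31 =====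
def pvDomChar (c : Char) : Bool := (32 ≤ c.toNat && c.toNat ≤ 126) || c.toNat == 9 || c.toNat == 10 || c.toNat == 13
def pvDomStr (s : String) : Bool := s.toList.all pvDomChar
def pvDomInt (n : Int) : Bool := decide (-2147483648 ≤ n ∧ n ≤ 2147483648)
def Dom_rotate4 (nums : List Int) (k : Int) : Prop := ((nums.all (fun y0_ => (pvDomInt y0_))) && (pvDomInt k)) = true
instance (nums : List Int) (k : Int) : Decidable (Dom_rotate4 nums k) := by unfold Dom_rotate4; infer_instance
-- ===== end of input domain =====

-- B replaces A's gcd-cycle cyclic-replacement rotation by a two-slice rotation (simpler);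
-- both mutate nums in place in Python (A by element writes, B by nums[:] = ...), with the same net effect;
-- the equivalence proved here is about the returned list.


-- ===== PORT A =====
-- inner `while True` loop of A: state (nums, temp, current, start, cnt); fuel only makes the
-- recursion structural (any fuel ≥ the cycle length gives Python's behaviour, proved below)
def rotate4Inner (k n : Int) : Nat → List Int → Int → Int → Int → Int → (List Int × Int × Int × Int)
  | 0, nums, _temp, current, start, cnt => (nums, current, start, cnt)
  | fuel+1, nums, temp, current, start, cnt =>
      let new_index := PySem.Int.mod (current + k) n
      let temp' := PySem.List.pyGetD nums new_index 0
      let nums' := nums.set new_index.toNat temp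
      let cnt' := cnt + 1
      if new_index = start then (nums', new_index + 1, start + 1, cnt')
      else rotate4Inner k n fuel nums' temp' new_index start cnt'

-- outer `while cnt < n` loop of A
def rotate4Outer (k n : Int) : Nat → List Int → Int → Int → Int → List Int
  | 0, nums, _current, _start, _cnt => nums
  | fuel+1, nums, current, start, cnt =>
      if cnt < n then
        -- temp = nums[current], passed straight into the inner loop
        let r := rotate4Inner k n nums.length nums (PySem.List.pyGetD nums current 0) current start cnt
        rotate4Outer k n fuel r.1 r.2.1 r.2.2.1 r.2.2.2
      else nums

def rotate4 (nums : List Int) (k : Int) : List Int :=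
  rotate4Outer k nums.length nums.length nums 0 0 0

-- ===== PORT B =====
def rotate4_alt (nums : List Int) (k : Int) : List Int :=
  let n : Int := nums.length
  if n = 0 then nums
  else
    let k' := PySem.Int.mod k n
    PySem.List.slice nums (some (n - k')) none ++ PySem.List.slice nums none (some (n - k'))

-- ===== PRECONDITION & SPEC =====
def Spec_rotate4 (nums : List Int) (k : Int) (out : List Int) : Prop := out = rotate4_alt nums k
instance (nums : List Int) (k : Int) (out : List Int) : Decidable (Spec_rotate4 nums k out) := by unfold Spec_rotate4; infer_instance

-- ===== CLAIM (what is proved, stated in full; the proofs are below) =====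
def Claim_equal_rotate4 : Prop := ∀ (nums : List Int) (k : Int), Dom_rotate4 nums k → Spec_rotate4 nums k (rotate4 nums k)

-- ===== LEMMAS AND PROOFS =====

-- index after t inner steps of the cycle starting at s
def posIdx (n κ s t : Nat) : Nat := (s + t * κ) % n
-- where A reads the value that ends at i (i.e. i - κ mod n)
def fIdx (n κ i : Nat) : Nat := (i + (n - κ)) % n
-- i was written during the first t steps of the cycle starting at s
def inOrbit (n κ s t i : Nat) : Prop := ∃ u, 1 ≤ u ∧ u ≤ t ∧ posIdx n κ s u = i

theorem posIdx_zero (n κ s : Nat) (hs : s < n) : posIdx n κ s 0 = s := by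
  simp [posIdx, Nat.mod_eq_of_lt hs]

theorem posIdx_lt (n κ s t : Nat) (hn : 0 < n) : posIdx n κ s t < n :=
  Nat.mod_lt _ hn

theorem posIdx_succ (n κ s t : Nat) : posIdx n κ s (t+1) = (posIdx n κ s t + κ) % n := by
  simp [posIdx, Nat.mod_add_mod, Nat.succ_mul, Nat.add_assoc]

theorem posIdx_eq_self_iff (n κ s t : Nat) (hs : s < n) :
    posIdx n κ s t = s ↔ n ∣ t * κ := by
  unfold posIdx
  constructor
  · intro h
    have h' : s ≡ s + t * κ [MOD n] := by
      unfold Nat.ModEq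
      rw [h, Nat.mod_eq_of_lt hs]
    have := (Nat.modEq_iff_dvd' (by omega)).1 h'
    simpa using this
  · intro h
    have h' : s ≡ s + t * κ [MOD n] := (Nat.modEq_iff_dvd' (by omega)).2 (by simpa using h)
    unfold Nat.ModEq at h'
    rw [← h', Nat.mod_eq_of_lt hs]

theorem posIdx_inj (n κ s u v : Nat) (huv : u ≤ v)
    (h : posIdx n κ s u = posIdx n κ s v) : n ∣ (v - u) * κ := by
  have h' : s + u * κ ≡ s + v * κ [MOD n] := h
  have := (Nat.modEq_iff_dvd' (by nlinarith)).1 h'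
  have heq : s + v * κ - (s + u * κ) = (v - u) * κ := by
    rw [Nat.sub_mul]; omega
  rwa [heq] at this

theorem nt1 (n κ t : Nat) (hn : 0 < n) : n ∣ t * κ ↔ (n / Nat.gcd n κ) ∣ t := by
  set g := Nat.gcd n κ with hg
  have hg0 : 0 < g := Nat.gcd_pos_of_pos_left _ hn
  have hn' : n = g * (n / g) := (Nat.mul_div_cancel' (Nat.gcd_dvd_left n κ)).symm
  have hκ' : κ = g * (κ / g) := (Nat.mul_div_cancel' (Nat.gcd_dvd_right n κ)).symm
  have hcop : Nat.Coprime (n / g) (κ / g) := Nat.coprime_div_gcd_div_gcd hg0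
  constructor
  · intro h
    rw [hn', hκ'] at h
    have h2 : g * (n / g) ∣ g * (t * (κ / g)) := by
      have : t * (g * (κ / g)) = g * (t * (κ / g)) := by ring
      rwa [this] at h
    have h3 : (n / g) ∣ t * (κ / g) := (Nat.mul_dvd_mul_iff_left hg0).1 h2
    exact hcop.dvd_of_dvd_mul_right h3
  · intro h
    have h2 : (n / g) ∣ t * (κ / g) := Dvd.dvd.mul_right h _
    have h3 : g * (n / g) ∣ g * (t * (κ / g)) := (Nat.mul_dvd_mul_iff_left hg0).2 h2
    have : t * (g * (κ / g)) = g * (t * (κ / g)) := by ring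
    rw [hn', hκ', this]
    exact h3

theorem fIdx_posIdx (n κ s u : Nat) (hκn : κ < n) :
    fIdx n κ (posIdx n κ s (u+1)) = posIdx n κ s u := by
  unfold fIdx posIdx
  rw [Nat.mod_add_mod]
  have h1 : s + (u + 1) * κ + (n - κ) = s + u * κ + n := by
    have : (u + 1) * κ = u * κ + κ := by ring
    omega
  rw [h1, Nat.add_mod_right]

theorem fIdx_lt (n κ i : Nat) (hn : 0 < n) : fIdx n κ i < n := Nat.mod_lt _ hn

theorem fIdx_class (n κ i : Nat) (hκn : κ ≤ n) (g : Nat)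
    (hgn : g ∣ n) (hgκ : g ∣ κ) : fIdx n κ i % g = i % g := by
  unfold fIdx
  rw [Nat.mod_mod_of_dvd _ hgn]
  have h1 : (n - κ) % g = 0 := by
    have : g ∣ n - κ := Nat.dvd_sub hgn hgκ
    omega
  rw [Nat.add_mod, h1]
  simp

theorem posIdx_class (n κ s t : Nat) (g : Nat) (hgn : g ∣ n) (hgκ : g ∣ κ) :
    posIdx n κ s t % g = s % g := by
  unfold posIdx
  rw [Nat.mod_mod_of_dvd _ hgn]
  obtain ⟨c, hc⟩ := hgκ
  rw [hc]
  have : s + t * (g * c) = s + g * (t * c) := by ring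
  rw [this, Nat.add_mul_mod_self_left]

-- surjectivity of the cycle onto its residue class mod g (Bezout)
theorem orbit_exists (n κ g L s i : Nat) (hn : 0 < n) (hκn : κ < n)
    (hg : g = Nat.gcd n κ) (hL : L = n / g) (hs : s < n) (hi : i < n)
    (hcl : i % g = s % g) : ∃ u, 1 ≤ u ∧ u ≤ L ∧ posIdx n κ s u = i := by
  have hg0 : 0 < g := hg ▸ Nat.gcd_pos_of_pos_left _ hn
  have hgn : g ∣ n := hg ▸ Nat.gcd_dvd_left n κ
  have hgκ : g ∣ κ := hg ▸ Nat.gcd_dvd_right n κ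
  have hL0 : 0 < L := by
    rw [hL]; exact Nat.div_pos (Nat.le_of_dvd hn hgn) hg0
  have hgL : g * L = n := by rw [hL]; exact Nat.mul_div_cancel' hgn
  have hnκL : n ∣ κ * L := by
    obtain ⟨c0, hc0⟩ := hgκ
    exact ⟨c0, by rw [hc0, ← hgL]; ring⟩
  -- d = i + n - s, divisible by g
  set d : Nat := i + n - s with hd
  have hgd : g ∣ d := by
    have h1 : (i + n) % g = s % g := by
      rw [Nat.add_mod]
      have : n % g = 0 := by omega
      rw [this]
      simp [hcl]
    have h2 : s ≡ i + n [MOD g] := h1.symm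
    have := (Nat.modEq_iff_dvd' (by omega)).1 h2
    simpa [hd] using this
  -- Bezout over ℤ
  have hbez : (g : Int) = n * Nat.gcdA n κ + κ * Nat.gcdB n κ := by
    rw [hg]; exact Nat.gcd_eq_gcd_ab n κ
  set B : Int := Nat.gcdB n κ with hB
  set c : Nat := d / g with hc
  have hdc : (d : Int) = g * c := by
    have : g * c = d := by rw [hc]; exact Nat.mul_div_cancel' hgd
    exact_mod_cast this.symm
  -- κ * (B*c) ≡ d  [ZMOD n]
  have key1 : (κ : Int) * (B * c) ≡ (d : Int) [ZMOD n] := by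
    apply Int.modEq_iff_dvd.mpr
    refine ⟨Nat.gcdA n κ * c, ?_⟩
    rw [hdc, hbez]; ring
  -- t := (B*c) mod L, as a natural
  set t0 : Int := (B * c) % (L : Int) with ht0
  have hL0' : (0:Int) < (L:Int) := by exact_mod_cast hL0
  have ht0nn : 0 ≤ t0 := Int.emod_nonneg _ (by omega)
  have ht0lt : t0 < L := Int.emod_lt_of_pos _ hL0'
  set t : Nat := t0.toNat with ht
  have htL : t < L := by omega
  have htcast : (t : Int) = t0 := Int.toNat_of_nonneg ht0nn
  -- κ * t ≡ κ * (B*c) [ZMOD n]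
  obtain ⟨m, hm⟩ := hnκL
  have hκL : (κ : Int) * (L : Int) = (n : Int) * m := by exact_mod_cast hm
  have key2 : (κ : Int) * t ≡ (κ : Int) * (B * c) [ZMOD n] := by
    apply Int.modEq_iff_dvd.mpr
    refine ⟨m * ((B * c) / (L : Int)), ?_⟩
    have h := Int.emod_add_ediv (B * c) (L : Int)
    rw [htcast, ht0]
    linear_combination ((B * c) / (L : Int)) * hκL - (κ : Int) * h
  have key : (κ : Int) * t ≡ (d : Int) [ZMOD n] := key2.trans key1
  -- back to ℕ
  have keyN : t * κ ≡ d [MOD n] := by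
    have : ((t * κ : Nat) : Int) ≡ ((d : Nat) : Int) [ZMOD (n : Nat)] := by
      push_cast
      calc (t : Int) * κ = (κ : Int) * t := by ring
        _ ≡ (d : Int) [ZMOD n] := key
    exact Int.natCast_modEq_iff.mp (by exact_mod_cast this)
  have hpos : posIdx n κ s t = i := by
    unfold posIdx
    have h1 : s + t * κ ≡ s + d [MOD n] := Nat.ModEq.add_left s keyN
    have h2 : s + d = i + n := by omega
    calc (s + t * κ) % n = (s + d) % n := h1
      _ = (i + n) % n := by rw [h2]
      _ = i % n := Nat.add_mod_right i n
      _ = i := Nat.mod_eq_of_lt hi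
  by_cases ht0' : t = 0
  · -- then i = s; use u = L (pos s L = s)
    refine ⟨L, hL0, le_refl _, ?_⟩
    have his : i = s := by
      rw [ht0'] at hpos
      rw [← hpos, posIdx_zero n κ s hs]
    have : n ∣ L * κ := ⟨m, by rw [← hm]; ring⟩
    rw [his]
    exact (posIdx_eq_self_iff n κ s L hs).2 this
  · exact ⟨t, by omega, by omega, hpos⟩

-- characterisation of the full orbit as a residue class mod g
theorem orbit_iff (n κ g L s i : Nat) (hn : 0 < n) (hκn : κ < n)
    (hg : g = Nat.gcd n κ) (hL : L = n / g) (hs : s < n) (hi : i < n) :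
    inOrbit n κ s L i ↔ i % g = s % g := by
  constructor
  · rintro ⟨u, _, _, rfl⟩
    exact posIdx_class n κ s u g (hg ▸ Nat.gcd_dvd_left n κ) (hg ▸ Nat.gcd_dvd_right n κ)
  · exact fun hcl => orbit_exists n κ g L s i hn hκn hg hL hs hi hcl

-- the Python index step (current + k) % n, in ℕ form
theorem step_mod (k : Int) (n κ : Nat) (hn : 0 < n)
    (hκ : (κ : Int) = PySem.Int.mod k n) (p : Nat) :
    PySem.Int.mod ((p : Int) + k) (n : Int) = (((p + κ) % n : Nat) : Int) := by
  have hn' : (0:Int) < (n:Int) := by exact_mod_cast hn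
  rw [PySem.Int.mod_eq_emod_of_pos hn']
  rw [PySem.Int.mod_eq_emod_of_pos hn'] at hκ
  have h1 : (p : Int) + k = ((p : Int) + (κ : Int)) + (n : Int) * (k / (n : Int)) := by
    rw [hκ]
    linarith [Int.emod_add_ediv k (n : Int)]
  rw [h1, Int.add_mul_emod_self_left]
  push_cast
  rfl

-- getD after set, both indices in range
theorem getD_set (b : List Int) (j i : Nat) (v : Int) (hj : j < b.length) (hi : i < b.length) :
    (b.set j v).getD i 0 = if j = i then v else b.getD i 0 := by
  rw [List.getD_eq_getElem?_getD, List.getD_eq_getElem?_getD, List.getElem?_set]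
  split_ifs with h
  · subst h; simp
  · rfl

theorem getD_eq_getElem (b : List Int) (i : Nat) (hi : i < b.length) :
    b.getD i 0 = b[i] := List.getD_eq_getElem b 0 hi

-- ===== inner loop specification =====
theorem inner_spec (k : Int) (n κ L : Nat) (hn : 0 < n) (hκn : κ < n)
    (hκ : (κ : Int) = PySem.Int.mod k n)
    (hLdvd : ∀ t : Nat, n ∣ t * κ ↔ L ∣ t) (hL0 : 0 < L)
    (a : List Int) (ha : a.length = n) (s : Nat) (hs : s < n) :
    ∀ (fuel : Nat) (t : Nat) (b : List Int) (c : Int), t < L → L - t ≤ fuel → b.length = n →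
    (∀ i, i < n → inOrbit n κ s t i → b.getD i 0 = a.getD (fIdx n κ i) 0) →
    (∀ i, i < n → ¬ inOrbit n κ s t i → b.getD i 0 = a.getD i 0) →
    ∃ bf, rotate4Inner k n fuel b (a.getD (posIdx n κ s t) 0) ((posIdx n κ s t : Nat) : Int) (s : Int) c
            = (bf, (s : Int) + 1, (s : Int) + 1, c + ((L - t : Nat) : Int))
      ∧ bf.length = n
      ∧ (∀ i, i < n → inOrbit n κ s L i → bf.getD i 0 = a.getD (fIdx n κ i) 0)
      ∧ (∀ i, i < n → ¬ inOrbit n κ s L i → bf.getD i 0 = a.getD i 0) := by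
  intro fuel
  induction fuel with
  | zero => intro t b c htL hfuel _ _ _; omega
  | succ m ih =>
    intro t b c htL hfuel hb hin hout
    have hps1 : posIdx n κ s (t+1) < n := posIdx_lt n κ s (t+1) hn
    -- this step writes position posIdx s (t+1), which was not written before
    have hnotOrb : ¬ inOrbit n κ s t (posIdx n κ s (t+1)) := by
      rintro ⟨u, hu1, hut, hueq⟩
      have hdvd : n ∣ (t + 1 - u) * κ := posIdx_inj n κ s u (t+1) (by omega) hueq
      have hdL : L ∣ (t + 1 - u) := (hLdvd _).1 hdvd
      have : L ≤ t + 1 - u := Nat.le_of_dvd (by omega) hdL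
      omega
    have hread : b.getD (posIdx n κ s (t+1)) 0 = a.getD (posIdx n κ s (t+1)) 0 :=
      hout _ hps1 hnotOrb
    -- unfold one step of the loop
    rw [rotate4Inner]
    have hstep : PySem.Int.mod (((posIdx n κ s t : Nat) : Int) + k) (n : Int)
        = ((posIdx n κ s (t+1) : Nat) : Int) := by
      rw [step_mod k n κ hn hκ (posIdx n κ s t), posIdx_succ]
    rw [hstep]
    simp only [PySem.List.pyGetD_natCast, Int.toNat_natCast]
    by_cases hend : t + 1 = L
    · -- last step: new_index = start, break
      have hposL : posIdx n κ s (t+1) = s := by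
        refine (posIdx_eq_self_iff n κ s (t+1) hs).2 ((hLdvd _).2 ?_)
        rw [hend]
      rw [if_pos (by exact_mod_cast congrArg (Nat.cast (R := Int)) hposL)]
      refine ⟨b.set (posIdx n κ s (t+1)) (a.getD (posIdx n κ s t) 0), ?_, ?_, ?_, ?_⟩
      · have h1 : ((posIdx n κ s (t+1) : Nat) : Int) + 1 = (s : Int) + 1 := by rw [hposL]
        have h2 : ((L - t : Nat) : Int) = 1 := by
          have h3 : L - t = 1 := by omega
          rw [h3]; rfl
        rw [h1, h2]
      · simp [hb]
      · intro i hi hio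
        rw [getD_set b _ i _ (by omega) (by omega)]
        by_cases hie : posIdx n κ s (t+1) = i
        · rw [if_pos hie, ← hie, fIdx_posIdx n κ s t hκn]
        · rw [if_neg hie]
          obtain ⟨u, h1, h2, h3⟩ := hio
          have hu : u ≤ t := by
            rcases Nat.lt_or_ge u (t+1) with h | h
            · omega
            · exfalso; exact hie (by rw [← h3]; congr 1; omega)
          exact hin i hi ⟨u, h1, hu, h3⟩
      · intro i hi hio
        rw [getD_set b _ i _ (by omega) (by omega)]
        rw [if_neg (fun hie => hio ⟨t+1, by omega, by omega, hie⟩)]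
        exact hout i hi (fun ⟨u, h1, h2, h3⟩ => hio ⟨u, h1, by omega, h3⟩)
    · -- not the last step: recurse
      have hposne : posIdx n κ s (t+1) ≠ s := by
        intro hcon
        have h1 := (hLdvd (t+1)).1 ((posIdx_eq_self_iff n κ s (t+1) hs).1 hcon)
        have := Nat.le_of_dvd (by omega) h1
        omega
      rw [if_neg (by
        intro hcon
        exact hposne (by exact_mod_cast hcon))]
      rw [hread]
      have hb' : (b.set (posIdx n κ s (t+1)) (a.getD (posIdx n κ s t) 0)).length = n := by
        simp [hb]
      have hin' : ∀ i, i < n → inOrbit n κ s (t+1) i →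
          (b.set (posIdx n κ s (t+1)) (a.getD (posIdx n κ s t) 0)).getD i 0
            = a.getD (fIdx n κ i) 0 := by
        intro i hi hio
        rw [getD_set b _ i _ (by omega) (by omega)]
        by_cases hie : posIdx n κ s (t+1) = i
        · rw [if_pos hie, ← hie, fIdx_posIdx n κ s t hκn]
        · rw [if_neg hie]
          obtain ⟨u, h1, h2, h3⟩ := hio
          have hu : u ≤ t := by
            rcases Nat.lt_or_ge u (t+1) with h | h
            · omega
            · exfalso; exact hie (by rw [← h3]; congr 1; omega)
          exact hin i hi ⟨u, h1, hu, h3⟩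
      have hout' : ∀ i, i < n → ¬ inOrbit n κ s (t+1) i →
          (b.set (posIdx n κ s (t+1)) (a.getD (posIdx n κ s t) 0)).getD i 0 = a.getD i 0 := by
        intro i hi hio
        rw [getD_set b _ i _ (by omega) (by omega)]
        rw [if_neg (fun hie => hio ⟨t+1, by omega, by omega, hie⟩)]
        exact hout i hi (fun ⟨u, h1, h2, h3⟩ => hio ⟨u, h1, by omega, h3⟩)
      obtain ⟨bf, heq, hbf, hbfin, hbfout⟩ :=
        ih (t+1) (b.set (posIdx n κ s (t+1)) (a.getD (posIdx n κ s t) 0)) (c+1)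
          (by omega) (by omega) hb' hin' hout'
      refine ⟨bf, ?_, hbf, hbfin, hbfout⟩
      rw [heq]
      have hc : c + 1 + ((L - (t+1) : Nat) : Int) = c + ((L - t : Nat) : Int) := by
        have h1 : L - t = (L - (t+1)) + 1 := by omega
        rw [h1]; push_cast; ring
      rw [hc]

-- ===== outer loop specification =====
theorem outer_spec (k : Int) (n κ g L : Nat) (hn : 0 < n) (hκn : κ < n)
    (hκ : (κ : Int) = PySem.Int.mod k n)
    (hg : g = Nat.gcd n κ) (hL : L = n / g)
    (a : List Int) (ha : a.length = n) :
    ∀ (fuel : Nat) (s : Nat) (b : List Int), s ≤ g → g - s ≤ fuel → b.length = n →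
    (∀ i, i < n → b.getD i 0 = if i % g < s then a.getD (fIdx n κ i) 0 else a.getD i 0) →
    ∃ bf, rotate4Outer k n fuel b (s : Int) (s : Int) ((s * L : Nat) : Int) = bf
      ∧ bf.length = n
      ∧ (∀ i, i < n → bf.getD i 0 = a.getD (fIdx n κ i) 0) := by
  have hg0 : 0 < g := hg ▸ Nat.gcd_pos_of_pos_left _ hn
  have hgn : g ∣ n := hg ▸ Nat.gcd_dvd_left n κ
  have hgκ : g ∣ κ := hg ▸ Nat.gcd_dvd_right n κ
  have hgL : g * L = n := by rw [hL]; exact Nat.mul_div_cancel' hgn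
  have hL0 : 0 < L := by
    rcases Nat.eq_zero_or_pos L with h | h
    · rw [h, Nat.mul_zero] at hgL; omega
    · exact h
  have hLdvd : ∀ t : Nat, n ∣ t * κ ↔ L ∣ t := by
    intro t; rw [hL, hg]; exact nt1 n κ t hn
  intro fuel
  induction fuel with
  | zero =>
    intro s b hsg hfuel hb hinv
    have hsg' : s = g := by omega
    refine ⟨b, rfl, hb, ?_⟩
    intro i hi
    rw [hinv _ hi, if_pos (by
      have := Nat.mod_lt i hg0
      omega)]
  | succ m ih =>
    intro s b hsg hfuel hb hinv
    by_cases hsG : s = g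
    · -- cnt = n: the outer loop exits
      rw [rotate4Outer]
      rw [if_neg (by
        subst hsG
        rw [hgL]
        omega)]
      refine ⟨b, rfl, hb, ?_⟩
      intro i hi
      rw [hinv _ hi, if_pos (by
        have := Nat.mod_lt i hg0
        omega)]
    · -- run one more cycle, starting at s
      have hsg2 : s < g := by omega
      have hsn : s < n := by
        have : g ≤ n := Nat.le_of_dvd hn hgn
        omega
      have hsmod : s % g = s := Nat.mod_eq_of_lt hsg2
      have hLn : L ≤ n := by
        rw [← hgL]
        exact Nat.le_mul_of_pos_left L hg0
      have hin0 : ∀ i, i < n → inOrbit n κ s 0 i → b.getD i 0 = b.getD (fIdx n κ i) 0 := by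
        rintro i hi ⟨u, h1, h2, _⟩; omega
      have hout0 : ∀ i, i < n → ¬ inOrbit n κ s 0 i → b.getD i 0 = b.getD i 0 :=
        fun i _ _ => rfl
      obtain ⟨bf, heq, hbf, hbfin, hbfout⟩ := inner_spec k n κ L hn hκn hκ hLdvd hL0 b hb s hsn
        b.length 0 b ((s * L : Nat) : Int) hL0 (by omega) hb hin0 hout0
      rw [posIdx_zero n κ s hsn] at heq
      have hinv' : ∀ i, i < n → bf.getD i 0 =
          if i % g < s + 1 then a.getD (fIdx n κ i) 0 else a.getD i 0 := by
        intro i hi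
        by_cases hio : inOrbit n κ s L i
        · have hcl : i % g = s := by
            have := (orbit_iff n κ g L s i hn hκn hg hL hsn hi).1 hio
            omega
          rw [hbfin i hi hio, if_pos (by omega)]
          have hfi : fIdx n κ i < n := fIdx_lt n κ i hn
          rw [hinv (fIdx n κ i) hfi, if_neg (by
            rw [fIdx_class n κ i (by omega) g hgn hgκ]
            omega)]
        · have hcl : ¬ (i % g = s) := by
            intro h
            exact hio ((orbit_iff n κ g L s i hn hκn hg hL hsn hi).2 (by omega))
          rw [hbfout i hi hio, hinv i hi]
          by_cases h2 : i % g < s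
          · rw [if_pos h2, if_pos (by omega)]
          · rw [if_neg h2, if_neg (by omega)]
      obtain ⟨bf2, heq2, hbf2, hinv2⟩ := ih (s+1) bf (by omega) (by omega) hbf hinv'
      refine ⟨bf2, ?_, hbf2, hinv2⟩
      rw [rotate4Outer]
      rw [if_pos (by
        have h1 : s * L < n := by
          calc s * L < g * L := (Nat.mul_lt_mul_right hL0).mpr hsg2
            _ = n := hgL
        exact_mod_cast h1)]
      have htemp : PySem.List.pyGetD b ((s : Nat) : Int) 0 = b.getD s 0 :=
        PySem.List.pyGetD_natCast b s 0
      rw [htemp, heq]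
      show rotate4Outer k (n : Int) m bf ((s : Int) + 1) ((s : Int) + 1)
        (((s * L : Nat) : Int) + ((L - 0 : Nat) : Int)) = bf2
      have hcnt : ((s * L : Nat) : Int) + ((L - 0 : Nat) : Int) = (((s + 1) * L : Nat) : Int) := by
        rw [Nat.sub_zero]
        push_cast
        ring
      have hcur : (s : Int) + 1 = ((s + 1 : Nat) : Int) := by push_cast; ring
      rw [hcnt, hcur]
      exact heq2

-- ===== B-side: the slice expression, pointwise =====
theorem alt_eq_drop_take (nums : List Int) (k : Int) (hne : nums ≠ []) :
    rotate4_alt nums k =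
      nums.drop (nums.length - (PySem.Int.mod k nums.length).toNat)
        ++ nums.take (nums.length - (PySem.Int.mod k nums.length).toNat) := by
  have hn : 0 < nums.length := List.length_pos_iff.2 hne
  have hn' : (0:Int) < (nums.length : Int) := by exact_mod_cast hn
  have hk'nn : 0 ≤ PySem.Int.mod k (nums.length : Int) := by
    rw [PySem.Int.mod_eq_emod_of_pos hn']
    exact Int.emod_nonneg _ (by omega)
  have hk'lt : PySem.Int.mod k (nums.length : Int) < nums.length := by
    rw [PySem.Int.mod_eq_emod_of_pos hn']
    exact Int.emod_lt_of_pos _ hn'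
  have hcast : (nums.length : Int) - PySem.Int.mod k (nums.length : Int)
      = ((nums.length - (PySem.Int.mod k (nums.length : Int)).toNat : Nat) : Int) := by
    omega
  show (if (nums.length : Int) = 0 then nums
      else PySem.List.slice nums (some ((nums.length : Int) - PySem.Int.mod k nums.length)) none
        ++ PySem.List.slice nums none (some ((nums.length : Int) - PySem.Int.mod k nums.length))) = _
  rw [if_neg (by omega), hcast, PySem.List.slice_from_natCast, PySem.List.slice_to_natCast]

theorem drop_take_getD (a : List Int) (κ : Nat) (hκ : κ < a.length) :
    ∀ i, i < a.length →
      (a.drop (a.length - κ) ++ a.take (a.length - κ)).getD i 0 = a.getD (fIdx a.length κ i) 0 := by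
  intro i hi
  set n := a.length with hn
  have hlend : (a.drop (n - κ)).length = κ := by
    rw [List.length_drop]; omega
  have hlent : (a.take (n - κ)).length = n - κ := by
    rw [List.length_take]; omega
  have hlen : (a.drop (n - κ) ++ a.take (n - κ)).length = n := by
    rw [List.length_append, List.length_drop, List.length_take]; omega
  rw [getD_eq_getElem _ i (by omega), getD_eq_getElem _ _ (by
    exact hn ▸ fIdx_lt n κ i (by omega))]
  unfold fIdx
  by_cases hiκ : i < κ
  · have h1 : (i + (n - κ)) % n = i + (n - κ) := Nat.mod_eq_of_lt (by omega)
    rw [List.getElem_append_left (by omega)]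
    rw [List.getElem_drop]
    congr 1
    omega
  · have h1 : (i + (n - κ)) % n = i - κ := by
      have h2 : i + (n - κ) = (i - κ) + n := by omega
      rw [h2, Nat.add_mod_right, Nat.mod_eq_of_lt (by omega)]
    rw [List.getElem_append_right (by omega)]
    rw [List.getElem_take]
    congr 1
    omega

-- ===== main equivalence =====
theorem rotate4_eq (nums : List Int) (k : Int) : rotate4 nums k = rotate4_alt nums k := by
  rcases List.eq_nil_or_concat nums with hnil | hne
  · subst hnil
    rfl
  · have hne' : nums ≠ [] := by
      rcases hne with ⟨l, x, rfl⟩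
      simp
    clear hne
    set n := nums.length with hn
    have hn0 : 0 < n := List.length_pos_iff.2 hne'
    have hn' : (0:Int) < (n:Int) := by exact_mod_cast hn0
    set κ : Nat := (PySem.Int.mod k (n : Int)).toNat with hκdef
    have hκ : (κ : Int) = PySem.Int.mod k n := by
      rw [hκdef, Int.toNat_of_nonneg (by
        rw [PySem.Int.mod_eq_emod_of_pos hn']
        exact Int.emod_nonneg _ (by omega))]
    have hκn : κ < n := by
      have : PySem.Int.mod k (n:Int) < n := by
        rw [PySem.Int.mod_eq_emod_of_pos hn']
        exact Int.emod_lt_of_pos _ hn'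
      omega
    set g : Nat := Nat.gcd n κ with hg
    set L : Nat := n / g with hL
    have hg0 : 0 < g := Nat.gcd_pos_of_pos_left _ hn0
    have hgle : g ≤ n := Nat.le_of_dvd hn0 (hg ▸ Nat.gcd_dvd_left n κ)
    have houter := outer_spec k n κ g L hn0 hκn hκ hg hL nums hn.symm n 0 nums
      (by omega) (by omega) hn.symm (by
        intro i hi
        rw [if_neg (by omega)])
    obtain ⟨bf, heq, hbf, hbfinv⟩ := houter
    have hA : rotate4 nums k = bf := by
      show rotate4Outer k (n : Int) n nums 0 0 0 = bf
      have h0 : ((0 : Nat) : Int) = 0 := by norm_num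
      have h00 : ((0 * L : Nat) : Int) = 0 := by norm_num
      rw [h0, h00] at heq
      exact heq
    rw [hA, alt_eq_drop_take nums k hne', ← hκdef]
    apply List.ext_getElem
    · rw [hbf, List.length_append, List.length_drop, List.length_take]
      omega
    · intro i h1 h2
      have hi : i < n := by omega
      rw [← getD_eq_getElem bf i (by omega)]
      rw [hbfinv i hi]
      have := drop_take_getD nums κ (hn ▸ hκn) i (by omega)
      rw [← hn] at this
      rw [← this]
      rw [getD_eq_getElem]

-- ===== VERDICT (by name: the statement is the Claim_ definition above) =====
theorem rotate4_spec : Claim_equal_rotate4 := by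
  intro nums k _
  unfold Spec_rotate4
  exact rotate4_eq nums k
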